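-- pv_equiv track=rewrite | github.com/AlexCrosby/AI-SOCO | vectorizer.py | char_vec
-- ===== SOURCE A (Python) =====
-- from string import printable
--
-- def char_vec(data):  # Taken from baseline is a count of every printable character used.
--     printable_dict = {char: idx for idx, char in enumerate(printable)}
--     output = []
--     for code in data:
--
--         vector = [0] * len(printable_dict)
--         for char in code:
--             if char in printable_dict:
--                 vector[printable_dict[char]] += 1
--         output.append(vector)
--     return output
-- ===== SOURCE B (Python) =====
-- from string import printable
--
--
-- def char_vec(data):
--     return [[code.count(ch) for ch in printable] for code in data]
-- ===== Notes on version B (the rewrite author's own statement) =====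
-- stated objective: idiomatic
-- what changed: B drops A's char-to-index dict and mutable count vector entirely: for each code it scans the string once per alphabet letter with str.count over the fixed printable alphabet (alphabet-major nested scans instead of A's string-major single pass with indexed increments).
import Mathlib
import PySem

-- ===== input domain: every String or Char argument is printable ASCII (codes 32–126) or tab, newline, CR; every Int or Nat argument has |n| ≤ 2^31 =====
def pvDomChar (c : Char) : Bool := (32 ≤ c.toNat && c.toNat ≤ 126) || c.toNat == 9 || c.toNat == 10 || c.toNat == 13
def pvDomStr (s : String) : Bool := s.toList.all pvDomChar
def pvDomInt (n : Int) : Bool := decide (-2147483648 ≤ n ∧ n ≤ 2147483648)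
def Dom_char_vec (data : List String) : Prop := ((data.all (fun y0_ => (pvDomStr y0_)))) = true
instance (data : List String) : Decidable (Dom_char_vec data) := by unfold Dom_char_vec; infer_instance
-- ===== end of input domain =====

-- B drops A's char->index dict and mutable count vector: for each code it scans the
-- string once per alphabet letter via str.count over the fixed printable alphabet
-- (alphabet-major nested scans instead of A's string-major indexed increments); objective: more idiomatic.

-- string.printable, shared by both ports
def pvPrintable : String := "0123456789abcdefghijklmnopqrstuvwxyzABCDEFGHIJKLMNOPQRSTUVWXYZ!\"#$%&'()*+,-./:;<=>?@[\\]^_`{|}~ \t\n\r\x0B\x0C"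

-- ===== PORT A =====
-- printable_dict = {char: idx for idx, char in enumerate(printable)}
def pvPrintableDict : PySem.Dict Char Int :=
  (PySem.List.enumerate pvPrintable.toList 0).foldl (fun d p => d.insert p.2 p.1) PySem.Dict.empty

def char_vec (data : List String) : List (List Int) :=
  data.foldl (fun output code =>
    let vector : List Int := List.replicate (PySem.Dict.size pvPrintableDict) 0
    let vector := code.toList.foldl (fun v c =>
      if PySem.Dict.contains pvPrintableDict c then
        PySem.List.pySetD v (PySem.Dict.getD pvPrintableDict c 0)
          (PySem.List.pyGetD v (PySem.Dict.getD pvPrintableDict c 0) 0 + 1)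
      else v) vector
    output ++ [vector]) []

-- ===== PORT B =====
def char_vec_alt (data : List String) : List (List Int) :=
  data.map (fun code =>
    pvPrintable.toList.map (fun ch => (PySem.Str.count code (String.ofList [ch]) : Int)))

-- ===== PRECONDITION & SPEC =====
def Spec_char_vec (data : List String) (out : List (List Int)) : Prop := out = char_vec_alt data
instance (data : List String) (out : List (List Int)) : Decidable (Spec_char_vec data out) := by unfold Spec_char_vec; infer_instance

-- ===== CLAIM (what is proved, stated in full; the proofs are below) =====
def Claim_equal_char_vec : Prop := ∀ (data : List String), Dom_char_vec data → Spec_char_vec data (char_vec data)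

-- ===== LEMMAS AND PROOFS =====

def pvStep (v : List Int) (c : Char) : List Int :=
  if PySem.Dict.contains pvPrintableDict c then
    PySem.List.pySetD v (PySem.Dict.getD pvPrintableDict c 0)
      (PySem.List.pyGetD v (PySem.Dict.getD pvPrintableDict c 0) 0 + 1)
  else v

set_option maxRecDepth 10000 in
theorem pv_nodup : pvPrintable.toList.Nodup := by decide

set_option maxRecDepth 10000 in
theorem pv_size : PySem.Dict.size pvPrintableDict = 100 := by decide

set_option maxRecDepth 10000 in
theorem pv_keys : pvPrintableDict.keys = pvPrintable.toList := by decide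

theorem pv_contains (c : Char) :
    PySem.Dict.contains pvPrintableDict c = true ↔ c ∈ pvPrintable.toList := by
  rw [PySem.Dict.contains_iff_mem_keys, pv_keys]

set_option maxRecDepth 10000 in
theorem pv_getD_map :
    pvPrintable.toList.map (fun c => PySem.Dict.getD pvPrintableDict c 0)
      = (List.range 100).map Int.ofNat := by decide

theorem pv_getD (j : Nat) (hj : j < 100) :
    PySem.Dict.getD pvPrintableDict (pvPrintable.toList[j]'(by simpa using hj)) 0 = (j : Int) := by
  have h := congrArg (fun l => l[j]?) pv_getD_map
  simp only [List.getElem?_map] at h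
  have h1 : pvPrintable.toList[j]? = some (pvPrintable.toList[j]'(by simpa using hj)) := by
    exact List.getElem?_eq_getElem (by simpa using hj)
  have h2 : (List.range 100)[j]? = some j := by
    simp [List.getElem?_range hj]
  rw [h1, h2] at h
  simp only [Option.map_some] at h
  rw [Option.some.injEq] at h
  rw [h]
  simp

theorem pv_len_step (cs : List Char) : ∀ v : List Int, (cs.foldl pvStep v).length = v.length := by
  induction cs with
  | nil => intro v; rfl
  | cons c cs ih =>
    intro v
    simp only [List.foldl_cons, ih]
    unfold pvStep
    split
    · exact PySem.List.length_pySetD _ _ _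
    · rfl

set_option maxRecDepth 10000 in
set_option maxHeartbeats 1600000 in
theorem pv_inv (cs : List Char) : ∀ (v : List Int), ∀ (hv : v.length = 100),
    ∀ (i : Nat) (hi : i < 100),
      (cs.foldl pvStep v)[i]?
        = some (v[i]'(by omega) + (cs.count (pvPrintable.toList[i]'(by simpa using hi)) : Int)) := by
  induction cs with
  | nil =>
    intro v hv i hi
    rw [List.foldl_nil, List.getElem?_eq_getElem (show i < v.length by omega)]
    simp only [List.count_nil, Nat.cast_zero, add_zero]
  | cons c cs ih =>
    intro v hv i hi
    simp only [List.foldl_cons]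
    by_cases hc : c ∈ pvPrintable.toList
    · obtain ⟨j, hj, hPj⟩ := List.mem_iff_getElem.mp hc
      have hj' : j < 100 := by simpa using hj
      have hstep : pvStep v c = v.set j (v[j]'(by omega) + 1) := by
        unfold pvStep
        rw [if_pos ((pv_contains c).mpr hc)]
        rw [← hPj, pv_getD j hj']
        simp only [PySem.List.pySetD_natCast, PySem.List.pyGetD_natCast]
        rw [List.getD_eq_getElem?_getD, List.getElem?_eq_getElem (show j < v.length by omega)]
        rfl
      rw [hstep, ih _ (by simp [hv]) i hi, Option.some.injEq]
      simp only [List.count_cons, beq_iff_eq]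
      by_cases hij : i = j
      · subst hij
        rw [List.getElem_set_self]
        split_ifs with h
        · push_cast; ring
        · simp [hPj] at h
      · rw [List.getElem_set_ne (by omega)]
        have hne : pvPrintable.toList[i]'(by simpa using hi) ≠ c := by
          rw [← hPj]
          intro h
          exact hij (pv_nodup.getElem_inj_iff.mp h)
        split_ifs with h
        · first
          | exact absurd h hne
          | exact absurd h.symm hne
        · push_cast; ring
    · have hstep : pvStep v c = v := by
        unfold pvStep
        rw [if_neg (by simpa using (fun h => hc ((pv_contains c).mp h)))]
      rw [hstep, ih _ hv i hi, Option.some.injEq]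
      have hne : pvPrintable.toList[i]'(by simpa using hi) ≠ c := by
        intro h; exact hc (h ▸ List.getElem_mem _)
      simp only [List.count_cons, beq_iff_eq]
      split_ifs with h
      · first
        | exact absurd h hne
        | exact absurd h.symm hne
      · push_cast; ring

set_option maxHeartbeats 1600000 in
theorem pv_inner (cs : List Char) :
    cs.foldl pvStep (List.replicate 100 (0 : Int))
      = pvPrintable.toList.map (fun ch => (cs.count ch : Int)) := by
  have hP : pvPrintable.toList.length = 100 := by simp [pvPrintable]
  apply List.ext_getElem?
  intro i
  by_cases hi : i < 100
  · rw [pv_inv _ _ (by simp) i hi]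
    rw [List.getElem?_map, List.getElem?_eq_getElem (show i < pvPrintable.toList.length by omega)]
    rw [List.getElem_replicate]
    simp
  · rw [List.getElem?_eq_none (by rw [pv_len_step]; simp; omega)]
    rw [List.getElem?_eq_none (by rw [List.length_map]; omega)]

-- str.count with a single-character needle is the character count
theorem pv_count_go_singleton (c : Char) :
    ∀ (l : List Char) (fuel acc : Nat), l.length ≤ fuel →
      PySem.Chars.count.go [c] fuel l acc = acc + l.count c := by
  intro l
  induction l with
  | nil => intro fuel acc _; cases fuel <;> simp [PySem.Chars.count.go]
  | cons h t ih =>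
    intro fuel acc hf
    cases fuel with
    | zero => simp at hf
    | succ f =>
      rw [PySem.Chars.count.go]
      by_cases hc : c = h
      · subst hc
        simp only [List.isPrefixOf_cons₂, List.isPrefixOf_nil_left, Bool.and_true, beq_self_eq_true,
          if_pos]
        simp only [List.length_cons, List.length_nil, Nat.zero_add, List.drop_succ_cons, List.drop_zero] at *
        rw [ih f (acc + 1) (by omega)]
        simp [List.count_cons]
        omega
      · have : [c].isPrefixOf (h :: t) = false := by
          simp [List.isPrefixOf_cons₂]
          exact fun h' => hc h'
        rw [this]
        simp only [Bool.false_eq_true, if_false]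
        simp only [List.length_cons] at hf
        rw [ih f acc (by omega)]
        simp [List.count_cons]
        intro h'; exact absurd h'.symm hc

theorem pv_count_singleton (s : String) (c : Char) :
    PySem.Str.count s (String.ofList [c]) = s.toList.count c := by
  have : PySem.Str.count s (String.ofList [c]) = PySem.Chars.count s.toList [c] := by
    simp [PySem.Str.count_eq, String.toList_ofList]
  rw [this]
  unfold PySem.Chars.count
  simp only [List.isEmpty_cons, Bool.false_eq_true, if_false]
  simpa using pv_count_go_singleton c s.toList s.toList.length 0 (le_refl _)

-- ===== VERDICT (by name: the statement is the Claim_ definition above) =====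
theorem char_vec_spec : Claim_equal_char_vec := by
  intro data _
  unfold Spec_char_vec char_vec char_vec_alt
  rw [PySem.List.foldl_append_singleton_eq_map]
  simp only [List.nil_append]
  apply List.map_congr_left
  intro code _
  rw [pv_size]
  show code.toList.foldl pvStep (List.replicate 100 0) = _
  rw [pv_inner]
  apply List.map_congr_left
  intro ch _
  rw [pv_count_singleton]
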